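-- pv_equiv track=rewrite | github.com/monk-time/algorithms | sprint3/p_partial_sort.py | count_max_blocks
-- ===== SOURCE A (Python) =====
-- from typing import List
--
-- def count_max_blocks(a: List[int]) -> int:
--     blocks = []
--     for n in a:
--         cur_min, cur_max = n, n
--         while blocks:
--             prev_min, prev_max = blocks[-1]
--             if prev_max <= cur_min:
--                 break
--             blocks.pop()
--             cur_min = min(prev_min, cur_min)
--             cur_max = max(prev_max, cur_max)
--         blocks.append((cur_min, cur_max))
--     return len(blocks)
-- ===== SOURCE B (Python) =====
-- from typing import List
--
-- def count_max_blocks(a: List[int]) -> int: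
--     n = len(a)
--     if n == 0:
--         return 0
--     suff = a[:]
--     for i in range(n - 2, -1, -1):
--         suff[i] = min(suff[i], suff[i + 1])
--     count = 0
--     hi = a[0]
--     for i in range(n):
--         hi = max(hi, a[i])
--         if i == n - 1 or hi <= suff[i + 1]:
--             count += 1
--     return count
-- ===== Notes on version B (the rewrite author's own statement) =====
-- stated objective: alternative
-- what changed: Replaced the monotonic-stack interval-merging (pop/merge blocks while the previous max exceeds the current min) with a suffix-minima array plus one prefix-max pass that counts positions where the running prefix max is at most the minimum of the remaining suffix.
import Mathlib
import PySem

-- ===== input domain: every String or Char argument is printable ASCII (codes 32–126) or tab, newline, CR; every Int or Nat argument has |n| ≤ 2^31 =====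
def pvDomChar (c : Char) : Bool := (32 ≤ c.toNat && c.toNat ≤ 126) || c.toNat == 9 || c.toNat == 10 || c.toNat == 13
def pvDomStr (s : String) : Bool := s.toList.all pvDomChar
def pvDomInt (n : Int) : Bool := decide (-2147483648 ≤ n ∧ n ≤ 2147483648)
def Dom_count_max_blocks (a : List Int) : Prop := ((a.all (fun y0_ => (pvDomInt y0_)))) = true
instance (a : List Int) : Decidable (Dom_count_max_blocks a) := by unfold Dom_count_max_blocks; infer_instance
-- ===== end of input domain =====

-- B replaces A's monotonic-stack interval merging by a suffix-minima array plus one prefix-max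
-- counting pass (objective: alternative algorithm, same O(n) cost).


-- ===== PORT A =====
-- Python's stack `blocks` is stored top-first (list head = Python's blocks[-1]);
-- `append` = cons, `pop` = step to the tail.  The while loop is `popLoop`.
def popLoop : List (Int × Int) → Int → Int → List (Int × Int) × Int × Int
  | [], curMin, curMax => ([], curMin, curMax)
  | (prevMin, prevMax) :: rest, curMin, curMax =>
    if prevMax ≤ curMin then ((prevMin, prevMax) :: rest, curMin, curMax)
    else popLoop rest (min prevMin curMin) (max prevMax curMax)

def stepA (blocks : List (Int × Int)) (n : Int) : List (Int × Int) :=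
  let r := popLoop blocks n n
  (r.2.1, r.2.2) :: r.1

def count_max_blocks (a : List Int) : Int :=
  ((a.foldl stepA []).length : Int)

-- ===== PORT B =====
-- Source B's `suff` array (suffix minima), built right-to-left.
def suffMins : List Int → List Int
  | [] => []
  | x :: xs =>
    match suffMins xs with
    | [] => [x]
    | m :: t => min x m :: m :: t

-- Source B's main loop: `hi` is the running prefix max, the second list the remaining
-- elements a[i:], the third the suffix-min list for a[i+1:] (empty ⇔ i == n-1).
def altGo (hi : Int) : List Int → List Int → Int
  | [], _ => 0
  | _ :: _, [] => 1
  | x :: xs, m :: t => (if max hi x ≤ m then (1:Int) else 0) + altGo (max hi x) xs t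

def count_max_blocks_alt (a : List Int) : Int :=
  match a with
  | [] => 0
  | x :: xs => altGo x (x :: xs) (suffMins xs)

-- ===== PRECONDITION & SPEC =====
def Spec_count_max_blocks (a : List Int) (out : Int) : Prop := out = count_max_blocks_alt a
instance (a : List Int) (out : Int) : Decidable (Spec_count_max_blocks a out) := by unfold Spec_count_max_blocks; infer_instance

-- ===== CLAIM (what is proved, stated in full; the proofs are below) =====
def Claim_equal_count_max_blocks : Prop := ∀ (a : List Int), Dom_count_max_blocks a → Spec_count_max_blocks a (count_max_blocks a)

-- ===== LEMMAS AND PROOFS =====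

-- A cut after index i is valid iff every element of a[:i+1] is ≤ every element of a[i+1:].
def cutOKb (a : List Int) (i : Nat) : Bool :=
  (a.take (i+1)).all (fun x => (a.drop (i+1)).all (fun y => decide (x ≤ y)))

def validCuts (a : List Int) : List Nat := (List.range a.length).filter (cutOKb a)

def pmax (hi : Int) (l : List Int) : Int := l.foldl max hi

def prefMax (a : List Int) (i : Nat) : Int :=
  match a.take (i+1) with
  | [] => 0
  | x :: xs => pmax x xs

def InvA (p : List Int) (s : List (Int × Int)) : Prop :=
  (∀ b ∈ s, b.1 ≤ b.2) ∧ s.Pairwise (fun sh dp => dp.2 ≤ sh.1) ∧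
  s.map Prod.snd = ((validCuts p).map (prefMax p)).reverse

theorem pmax_le (l : List Int) (hi c : Int) :
    pmax hi l ≤ c ↔ hi ≤ c ∧ ∀ x ∈ l, x ≤ c := by
  induction l generalizing hi with
  | nil => simp [pmax]
  | cons x l ih =>
    have h : pmax hi (x :: l) = pmax (max hi x) l := rfl
    rw [h, ih]
    simp only [max_le_iff, List.mem_cons]
    constructor
    · rintro ⟨⟨h1, h2⟩, h3⟩
      exact ⟨h1, fun y hy => by rcases hy with rfl | hy; exact h2; exact h3 y hy⟩
    · rintro ⟨h1, h2⟩
      exact ⟨⟨h1, h2 x (Or.inl rfl)⟩, fun y hy => h2 y (Or.inr hy)⟩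


theorem prefMax_le (a : List Int) (i : Nat) (c : Int) (h : a.take (i+1) ≠ []) :
    prefMax a i ≤ c ↔ ∀ x ∈ a.take (i+1), x ≤ c := by
  cases htk : a.take (i+1) with
  | nil => exact absurd htk h
  | cons x xs =>
    have h1 : prefMax a i = pmax x xs := by simp [prefMax, htk]
    rw [h1, pmax_le]
    simp only [List.mem_cons]
    constructor
    · rintro ⟨h1, h2⟩ z hz
      rcases hz with rfl | hz; exact h1; exact h2 z hz
    · intro h2
      exact ⟨h2 x (Or.inl rfl), fun z hz => h2 z (Or.inr hz)⟩


theorem le_foldl_min (l : List (Int × Int)) (c d : Int) :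
    d ≤ l.foldl (fun acc b => min b.1 acc) c ↔ d ≤ c ∧ ∀ b ∈ l, d ≤ b.1 := by
  induction l generalizing c with
  | nil => simp
  | cons b l ih =>
    simp only [List.foldl_cons, List.mem_cons]
    rw [ih]
    constructor
    · rintro ⟨h1, h2⟩
      rw [le_min_iff] at h1
      exact ⟨h1.2, fun b' hb' => by rcases hb' with rfl | hb'; exact h1.1; exact h2 b' hb'⟩
    · rintro ⟨h1, h2⟩
      exact ⟨le_min_iff.mpr ⟨h2 b (Or.inl rfl), h1⟩, fun b' hb' => h2 b' (Or.inr hb')⟩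


theorem foldl_max2_le (l : List (Int × Int)) (M c : Int) :
    l.foldl (fun acc b => max b.2 acc) M ≤ c ↔ M ≤ c ∧ ∀ b ∈ l, b.2 ≤ c := by
  induction l generalizing M with
  | nil => simp
  | cons b l ih =>
    simp only [List.foldl_cons, List.mem_cons]
    rw [ih]
    constructor
    · rintro ⟨h1, h2⟩
      rw [max_le_iff] at h1
      exact ⟨h1.2, fun b' hb' => by rcases hb' with rfl | hb'; exact h1.1; exact h2 b' hb'⟩
    · rintro ⟨h1, h2⟩
      exact ⟨max_le_iff.mpr ⟨h2 b (Or.inl rfl), h1⟩, fun b' hb' => h2 b' (Or.inr hb')⟩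


theorem pop_spec (n : Int) (s : List (Int × Int)) (c M : Int)
    (hpw : s.Pairwise (fun sh dp => dp.2 ≤ sh.1))
    (hc : ∀ b ∈ s, (b.2 ≤ c ↔ b.2 ≤ n)) :
    popLoop s c M = (s.dropWhile (fun b => decide (n < b.2)),
      (s.takeWhile (fun b => decide (n < b.2))).foldl (fun acc b => min b.1 acc) c,
      (s.takeWhile (fun b => decide (n < b.2))).foldl (fun acc b => max b.2 acc) M) := by
  induction s generalizing c M with
  | nil => simp [popLoop]
  | cons b rest ih =>
    obtain ⟨m, M1⟩ := b
    rw [List.pairwise_cons] at hpw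
    have hbn := hc (m, M1) (List.mem_cons_self)
    by_cases hM1 : M1 ≤ c
    · have hnlt : ¬ (n < M1) := by have := hbn.mp hM1; omega
      simp [popLoop, hM1, hnlt]
    · have hlt : n < M1 := by
        by_contra hcon
        exact hM1 (hbn.mpr (by omega))
      have hc' : ∀ b ∈ rest, (b.2 ≤ min m c ↔ b.2 ≤ n) := by
        intro b hb
        have h1 := hc b (List.mem_cons_of_mem _ hb)
        have h2 : b.2 ≤ m := hpw.1 b hb
        rw [le_min_iff]
        constructor
        · rintro ⟨_, hcc⟩; exact h1.mp hcc
        · intro hn; exact ⟨h2, h1.mpr hn⟩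
      have := ih (min m c) (max M1 M) hpw.2 hc'
      simp [popLoop, hM1, hlt, this]


theorem dropWhile_sorted_filter (l : List Int) (n : Int)
    (h : l.Pairwise (fun x y => y ≤ x)) :
    l.dropWhile (fun x => decide (n < x)) = l.filter (fun x => decide (x ≤ n)) := by
  induction l with
  | nil => simp
  | cons x l ih =>
    rw [List.pairwise_cons] at h
    by_cases hnx : n < x
    · have hxn : ¬ (x ≤ n) := by omega
      simp only [List.dropWhile_cons, List.filter_cons, decide_eq_true_eq, hnx, if_true, hxn,
        if_false]
      exact ih h.2
    · have hxn : x ≤ n := by omega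
      simp only [List.dropWhile_cons, List.filter_cons, decide_eq_true_eq, hnx, if_false, hxn,
        if_true]
      rw [List.filter_eq_self.mpr]
      intro y hy
      simpa using le_trans (h.1 y hy) hxn


theorem filter_of_map {α β : Type} (f : α → β) (p : β → Bool) (l : List α) :
    (l.map f).filter p = (l.filter (fun a => p (f a))).map f := by
  induction l with
  | nil => simp
  | cons a l ih =>
    simp only [List.map_cons, List.filter_cons]
    cases p (f a) <;> simp [ih]


theorem cutOK_append_lt (p : List Int) (n : Int) (i : Nat) (h : i < p.length) :
    cutOKb (p ++ [n]) i = (cutOKb p i && decide (prefMax p i ≤ n)) := by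
  have h1 : (p ++ [n]).take (i+1) = p.take (i+1) := List.take_append_of_le_length (by omega)
  have h2 : (p ++ [n]).drop (i+1) = p.drop (i+1) ++ [n] := List.drop_append_of_le_length (by omega)
  have hne : p.take (i+1) ≠ [] := by
    apply List.ne_nil_of_length_pos
    rw [List.length_take]
    omega
  rw [Bool.eq_iff_iff]
  simp only [cutOKb, h1, h2, List.all_append, Bool.and_eq_true, List.all_eq_true,
    decide_eq_true_eq, List.all_cons, List.all_nil, and_true]
  rw [prefMax_le _ _ _ hne]
  constructor
  · intro hh
    exact ⟨fun x hx y hy => (hh x hx).1 y hy, fun x hx => (hh x hx).2⟩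
  · rintro ⟨hh1, hh2⟩ x hx
    exact ⟨hh1 x hx, hh2 x hx⟩


theorem cutOK_append_last (p : List Int) (n : Int) :
    cutOKb (p ++ [n]) p.length = true := by
  have h2 : (p ++ [n]).drop (p.length + 1) = [] := by
    apply List.drop_eq_nil_of_le
    simp
  simp [cutOKb, h2]


theorem cutOK_last (p : List Int) (h : p ≠ []) :
    cutOKb p (p.length - 1) = true := by
  have hlen : 0 < p.length := List.length_pos_of_ne_nil h
  have h2 : p.drop (p.length - 1 + 1) = [] := by
    apply List.drop_eq_nil_of_le
    omega
  simp [cutOKb, h2]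


theorem prefMax_append_lt (p : List Int) (n : Int) (i : Nat) (h : i < p.length) :
    prefMax (p ++ [n]) i = prefMax p i := by
  have h1 : (p ++ [n]).take (i+1) = p.take (i+1) := List.take_append_of_le_length (by omega)
  simp [prefMax, h1]


theorem validCuts_append (p : List Int) (n : Int) :
    validCuts (p ++ [n]) =
      (validCuts p).filter (fun i => decide (prefMax p i ≤ n)) ++ [p.length] := by
  show (List.range (p ++ [n]).length).filter (cutOKb (p ++ [n])) = _
  have hl : (p ++ [n]).length = p.length + 1 := by simp
  rw [hl, List.range_succ, List.filter_append]
  unfold validCuts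
  rw [List.filter_filter]
  congr 1
  · exact List.filter_congr (fun i hi =>
      (cutOK_append_lt p n i (List.mem_range.mp hi)).trans
        (Bool.and_comm (cutOKb p i) (decide (prefMax p i ≤ n))))
  · simp [cutOK_append_last]


theorem stepA_inv (p : List Int) (n : Int) (s : List (Int × Int)) (h : InvA p s) :
    InvA (p ++ [n]) (stepA s n) := by
  obtain ⟨hwf, hpw, hmap⟩ := h
  have hpop := pop_spec n s n n hpw (fun b _ => Iff.rfl)
  have hstep : stepA s n =
      ((s.takeWhile (fun b => decide (n < b.2))).foldl (fun acc b => min b.1 acc) n,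
       (s.takeWhile (fun b => decide (n < b.2))).foldl (fun acc b => max b.2 acc) n)
        :: s.dropWhile (fun b => decide (n < b.2)) := by
    unfold stepA
    rw [hpop]
  have hsplit : s.takeWhile (fun b => decide (n < b.2)) ++ s.dropWhile (fun b => decide (n < b.2)) = s :=
    List.takeWhile_append_dropWhile
  have hpwApp : List.Pairwise (fun (sh dp : Int × Int) => dp.2 ≤ sh.1)
      (s.takeWhile (fun b => decide (n < b.2)) ++ s.dropWhile (fun b => decide (n < b.2))) := by
    rw [hsplit]; exact hpw
  rw [List.pairwise_append] at hpwApp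
  obtain ⟨pwPop, pwSurv, hcross⟩ := hpwApp
  have hsort : (s.map Prod.snd).Pairwise (fun x y => y ≤ x) := by
    apply List.pairwise_map.mpr
    apply hpw.imp_of_mem
    intro a b ha hb hr
    exact le_trans hr (hwf a ha)
  have hsurv_snd : (s.dropWhile (fun b => decide (n < b.2))).map Prod.snd
      = (s.map Prod.snd).filter (fun x => decide (x ≤ n)) := by
    rw [← dropWhile_sorted_filter _ n hsort, List.dropWhile_map]
    rfl
  have hsurv_le : ∀ d ∈ s.dropWhile (fun b => decide (n < b.2)), d.2 ≤ n := by
    intro d hd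
    have hm : d.2 ∈ (s.dropWhile (fun b => decide (n < b.2))).map Prod.snd :=
      List.mem_map_of_mem hd
    rw [hsurv_snd] at hm
    simpa using List.of_mem_filter hm
  have hcle : (s.takeWhile (fun b => decide (n < b.2))).foldl (fun acc b => min b.1 acc) n ≤ n :=
    ((le_foldl_min _ n _).mp le_rfl).1
  have hMstar := (foldl_max2_le (s.takeWhile (fun b => decide (n < b.2))) n _).mp le_rfl
  have hmem_popped : ∀ b ∈ s.takeWhile (fun b => decide (n < b.2)), b ∈ s :=
    fun b hb => (List.takeWhile_sublist _).subset hb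
  have hmem_surv : ∀ b ∈ s.dropWhile (fun b => decide (n < b.2)), b ∈ s :=
    fun b hb => (List.dropWhile_sublist _).subset hb
  -- every stack max is a prefMax at a valid cut
  have hstack_max : ∀ b ∈ s, ∃ i ∈ validCuts p, prefMax p i = b.2 := by
    intro b hb
    have hm : b.2 ∈ s.map Prod.snd := List.mem_map_of_mem hb
    rw [hmap, List.mem_reverse] at hm
    exact List.mem_map.mp hm
  have htake_ne : ∀ i : Nat, i < p.length → p.take (i+1) ≠ [] := by
    intro i hi
    apply List.ne_nil_of_length_pos
    rw [List.length_take]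
    omega
  have hvc_lt : ∀ i ∈ validCuts p, i < p.length := by
    intro i hi
    exact List.mem_range.mp (List.mem_filter.mp hi).1
  have hbound_a : ∀ c : Int, (∀ x ∈ p, x ≤ c) →
      ∀ b ∈ s.takeWhile (fun b => decide (n < b.2)), b.2 ≤ c := by
    intro c hc b hb
    obtain ⟨i, hivc, hieq⟩ := hstack_max b (hmem_popped b hb)
    rw [← hieq, prefMax_le _ _ _ (htake_ne i (hvc_lt i hivc))]
    intro x hx
    exact hc x (List.mem_of_mem_take hx)
  have hbound_b : ∀ c : Int, p ≠ [] → n ≤ c →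
      (∀ b ∈ s.takeWhile (fun b => decide (n < b.2)), b.2 ≤ c) → ∀ x ∈ p, x ≤ c := by
    intro c hp hnc hbc x hx
    have hlen : 0 < p.length := List.length_pos_of_ne_nil hp
    have hi0 : p.length - 1 ∈ validCuts p := by
      apply List.mem_filter.mpr
      exact ⟨List.mem_range.mpr (by omega), cutOK_last p hp⟩
    have hm : prefMax p (p.length - 1) ∈ s.map Prod.snd := by
      rw [hmap, List.mem_reverse]
      exact List.mem_map_of_mem hi0
    obtain ⟨b, hbs, hbeq⟩ := List.mem_map.mp hm
    have hble : b.2 ≤ c := by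
      rw [← hsplit] at hbs
      rcases List.mem_append.mp hbs with hbp | hbsv
      · exact hbc b hbp
      · exact le_trans (hsurv_le b hbsv) hnc
    have hxle : x ≤ prefMax p (p.length - 1) := by
      have htk : p.take (p.length - 1 + 1) = p := by
        have : p.length - 1 + 1 = p.length := by omega
        rw [this, List.take_length]
      exact (prefMax_le _ _ _ (by rw [htk]; exact hp)).mp le_rfl x (by rw [htk]; exact hx)
    calc x ≤ prefMax p (p.length - 1) := hxle
      _ = b.2 := hbeq.symm
      _ ≤ c := hble
  -- the new top block's max is the max of the whole p ++ [n]
  have hhead : (s.takeWhile (fun b => decide (n < b.2))).foldl (fun acc b => max b.2 acc) n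
      = prefMax (p ++ [n]) p.length := by
    by_cases hp : p = []
    · subst hp
      have hs : s = [] := by
        have h5 := hmap
        simp [validCuts] at h5
        exact h5
      subst hs
      rfl
    · have hT : (p ++ [n]).take (p.length + 1) = p ++ [n] := by
        have : p.length + 1 = (p ++ [n]).length := by simp
        rw [this, List.take_length]
      have hchar1 : ∀ c : Int, prefMax (p ++ [n]) p.length ≤ c ↔ (∀ x ∈ p, x ≤ c) ∧ n ≤ c := by
        intro c
        rw [prefMax_le _ _ _ (by rw [hT]; simp)]
        rw [hT]
        simp only [List.mem_append, List.mem_singleton]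
        constructor
        · intro hh
          exact ⟨fun x hx => hh x (Or.inl hx), hh n (Or.inr rfl)⟩
        · rintro ⟨h1, h2⟩ x hx
          rcases hx with hx | rfl; exact h1 x hx; exact h2
      apply le_antisymm
      · rw [foldl_max2_le]
        have hpf := (hchar1 _).mp le_rfl
        exact ⟨hpf.2, hbound_a _ hpf.1⟩
      · rw [hchar1]
        exact ⟨hbound_b _ hp hMstar.1 hMstar.2, hMstar.1⟩
  rw [hstep]
  refine ⟨?_, ?_, ?_⟩
  · intro b hb
    rcases List.mem_cons.mp hb with rfl | hb
    · exact le_trans hcle hMstar.1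
    · exact hwf b (hmem_surv b hb)
  · apply List.pairwise_cons.mpr
    refine ⟨?_, pwSurv⟩
    intro d hd
    rw [le_foldl_min]
    exact ⟨hsurv_le d hd, fun b hb => hcross b hb d hd⟩
  · rw [validCuts_append, List.map_append, List.reverse_append]
    have hmapcongr : (((validCuts p).filter (fun i => decide (prefMax p i ≤ n))).map (prefMax (p ++ [n])))
        = ((validCuts p).filter (fun i => decide (prefMax p i ≤ n))).map (prefMax p) := by
      apply List.map_congr_left
      intro i hi
      exact prefMax_append_lt p n i (hvc_lt i (List.mem_filter.mp hi).1)
    rw [hmapcongr]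
    simp only [List.map_cons, List.map_nil, List.reverse_cons, List.reverse_nil, List.nil_append,
      List.singleton_append]
    rw [hsurv_snd, hmap, List.filter_reverse, filter_of_map, hhead]


theorem invA_foldl (a : List Int) : InvA a (a.foldl stepA []) := by
  induction a using List.reverseRecOn with
  | nil =>
    refine ⟨by simp, by simp, ?_⟩
    simp [validCuts]
  | append_singleton p n ih =>
    rw [List.foldl_append]
    exact stepA_inv p n _ ih


theorem A_count (a : List Int) : count_max_blocks a = ((validCuts a).length : Int) := by
  have h3 := (invA_foldl a).2.2
  have h4 : (a.foldl stepA []).length = (validCuts a).length := by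
    have := congrArg List.length h3
    simpa using this
  unfold count_max_blocks
  exact_mod_cast h4


-- ---- B side ----

def sGo (hi : Int) : List Int → Int
  | [] => 0
  | x :: xs => (if xs.all (fun y => decide (max hi x ≤ y)) then (1:Int) else 0) + sGo (max hi x) xs

theorem suffMins_nil_iff (xs : List Int) : suffMins xs = [] ↔ xs = [] := by
  cases xs with
  | nil => simp [suffMins]
  | cons x xs =>
    simp only [suffMins]
    cases suffMins xs <;> simp


theorem suffMins_tail (xs : List Int) (m : Int) (t : List Int) (h : suffMins xs = m :: t) :
    t = suffMins xs.tail := by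
  cases xs with
  | nil => simp [suffMins] at h
  | cons y ys =>
    simp only [suffMins] at h
    cases hys : suffMins ys with
    | nil =>
      rw [hys] at h
      cases h
      simp [List.tail, (suffMins_nil_iff ys).mp hys, suffMins]
    | cons m' t' =>
      rw [hys] at h
      cases h
      simp [List.tail, hys]


theorem suffMins_head (xs : List Int) (m : Int) (t : List Int) (h : suffMins xs = m :: t)
    (c : Int) : c ≤ m ↔ ∀ y ∈ xs, c ≤ y := by
  induction xs generalizing m t with
  | nil => simp [suffMins] at h
  | cons y ys ih =>
    simp only [suffMins] at h
    cases hys : suffMins ys with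
    | nil =>
      rw [hys] at h
      cases h
      have : ys = [] := (suffMins_nil_iff ys).mp hys
      subst this
      simp
    | cons m' t' =>
      rw [hys] at h
      cases h
      rw [le_min_iff, ih m' t' hys]
      simp only [List.mem_cons]
      constructor
      · rintro ⟨h1, h2⟩ z hz
        rcases hz with rfl | hz; exact h1; exact h2 z hz
      · intro h2
        exact ⟨h2 y (Or.inl rfl), fun z hz => h2 z (Or.inr hz)⟩


theorem altGo_eq_sGo (l : List Int) (hi : Int) :
    altGo hi l (suffMins l.tail) = sGo hi l := by
  induction l generalizing hi with
  | nil => simp [altGo, sGo]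
  | cons x xs ih =>
    simp only [List.tail_cons]
    cases hsm : suffMins xs with
    | nil =>
      have hx : xs = [] := (suffMins_nil_iff xs).mp hsm
      subst hx
      simp [altGo, sGo]
    | cons m t =>
      have ht : t = suffMins xs.tail := suffMins_tail xs m t hsm
      have hA : altGo hi (x :: xs) (m :: t) = (if max hi x ≤ m then (1:Int) else 0) + altGo (max hi x) xs t := rfl
      have hS : sGo hi (x :: xs) = (if xs.all (fun y => decide (max hi x ≤ y)) = true then (1:Int) else 0) + sGo (max hi x) xs := rfl
      rw [hA, ht, ih, hS]
      congr 1
      apply if_congr _ rfl rfl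
      rw [suffMins_head xs m t hsm]
      simp [List.all_eq_true]


theorem sGo_count (v : List Int) (hi : Int) :
    sGo hi v = (((List.range v.length).filter
      (fun j => (v.drop (j+1)).all (fun y => decide (pmax hi (v.take (j+1)) ≤ y)))).length : Int) := by
  induction v generalizing hi with
  | nil => simp [sGo]
  | cons x xs ih =>
    have hS : sGo hi (x :: xs) = (if xs.all (fun y => decide (max hi x ≤ y)) = true then (1:Int) else 0) + sGo (max hi x) xs := rfl
    rw [hS, ih, List.length_cons, List.range_succ_eq_map, List.filter_cons]
    have hhead : (((x :: xs).drop (0+1)).all (fun y => decide (pmax hi ((x :: xs).take (0+1)) ≤ y)))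
        = xs.all (fun y => decide (max hi x ≤ y)) := by
      simp [pmax]
    have hmap : (List.range xs.length).filter
          ((fun j => ((x :: xs).drop (j+1)).all (fun y => decide (pmax hi ((x :: xs).take (j+1)) ≤ y))) ∘ Nat.succ)
        = (List.range xs.length).filter
          (fun j => (xs.drop (j+1)).all (fun y => decide (pmax (max hi x) (xs.take (j+1)) ≤ y))) := by
      apply List.filter_congr
      intro j _
      simp only [Function.comp_apply, Nat.succ_eq_add_one]
      have hd : (x :: xs).drop (j+1+1) = xs.drop (j+1) := rfl
      have htk : (x :: xs).take (j+1+1) = x :: xs.take (j+1) := rfl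
      have hp : pmax hi (x :: xs.take (j+1)) = pmax (max hi x) (xs.take (j+1)) := rfl
      rw [hd, htk, hp]
    rw [hhead, List.filter_map, hmap]
    by_cases hc : xs.all (fun y => decide (max hi x ≤ y)) = true
    · simp only [hc, if_true, List.length_cons, List.length_map]
      push_cast
      ring
    · simp only [hc]
      simp


theorem B_count (a : List Int) : count_max_blocks_alt a = ((validCuts a).length : Int) := by
  cases a with
  | nil => simp [count_max_blocks_alt, validCuts]
  | cons x xs =>
    have h1 : count_max_blocks_alt (x :: xs) = altGo x (x :: xs) (suffMins xs) := rfl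
    have h2 : altGo x (x :: xs) (suffMins xs) = sGo x (x :: xs) := by
      simpa using altGo_eq_sGo (x :: xs) x
    rw [h1, h2, sGo_count]
    have hfl : (List.range (x :: xs).length).filter
        (fun j => ((x :: xs).drop (j+1)).all (fun y => decide (pmax x ((x :: xs).take (j+1)) ≤ y)))
        = validCuts (x :: xs) := by
      unfold validCuts
      apply List.filter_congr
      intro j hj
      have hne : (x :: xs).take (j+1) ≠ [] := by simp [List.take_succ_cons]
      have hpm : pmax x ((x :: xs).take (j+1)) = prefMax (x :: xs) j := by
        rw [List.take_succ_cons]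
        have h3 : pmax x (x :: xs.take j) = pmax (max x x) (xs.take j) := rfl
        rw [h3, max_self]
        simp [prefMax, List.take_succ_cons]
      rw [hpm, Bool.eq_iff_iff]
      simp only [cutOKb, List.all_eq_true, decide_eq_true_eq]
      constructor
      · intro hh z hz y hy
        exact le_trans ((prefMax_le _ _ _ hne).mp le_rfl z hz) (hh y hy)
      · intro hh y hy
        exact (prefMax_le _ _ _ hne).mpr (fun z hz => hh z hz y hy)
    rw [hfl]


-- ===== VERDICT (by name: the statement is the Claim_ definition above) =====
theorem count_max_blocks_spec : Claim_equal_count_max_blocks := by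
  intro a _
  unfold Spec_count_max_blocks
  rw [A_count, B_count]
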